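-- pv_equiv track=rewrite | github.com/openshs/openshs | app/repeater/repeater.py | find_longest_sub_pattern_idx
-- ===== SOURCE A (Python) =====
-- def find_longest_sub_pattern_idx(readings):
--     start_idx = 0
--     longest = 0
--     subpats = []
--     for i, row in enumerate(readings):
--         if readings[start_idx] == row:
--             longest += 1
--         else:
--             subpats.append((start_idx, longest))
--             start_idx = longest
--             longest += 1
--     subpats.append((start_idx, longest))
--
--     ll = 1
--     longest = 0
--     for i, idx in enumerate(subpats):
--         if (idx[1] - idx[0]) > ll:
--             ll = idx[1] - idx[0]
--             longest = i
--
--     return subpats[longest]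
-- ===== SOURCE B (Python) =====
-- def find_longest_sub_pattern_idx(readings):
--     best = (0, 0)
--     best_len = 0
--     run_start = 0
--     for i in range(1, len(readings)):
--         if readings[i] != readings[run_start]:
--             if i - run_start > best_len:
--                 best = (run_start, i)
--                 best_len = i - run_start
--             run_start = i
--     n = len(readings)
--     if n - run_start > best_len:
--         best = (run_start, n)
--     return best
-- ===== Notes on version B (the rewrite author's own statement) =====
-- stated objective: simpler
-- what changed: Replaces the two-phase build-a-subpats-list-then-scan-it with a single linear pass that tracks the current run start and the best run so far, never materialising the intermediate list.
import Mathlib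
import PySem

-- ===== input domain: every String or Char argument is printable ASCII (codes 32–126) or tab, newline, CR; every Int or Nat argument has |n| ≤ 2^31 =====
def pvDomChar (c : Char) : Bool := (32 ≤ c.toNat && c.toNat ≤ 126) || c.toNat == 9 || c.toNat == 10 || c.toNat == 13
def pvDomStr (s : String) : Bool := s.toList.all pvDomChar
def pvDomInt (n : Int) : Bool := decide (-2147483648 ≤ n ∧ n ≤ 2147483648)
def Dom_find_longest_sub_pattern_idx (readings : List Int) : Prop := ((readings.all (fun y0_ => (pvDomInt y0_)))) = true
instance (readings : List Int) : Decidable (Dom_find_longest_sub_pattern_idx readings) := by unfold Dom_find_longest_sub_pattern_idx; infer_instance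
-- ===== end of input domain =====

-- B: single-pass best-run tracker replacing A's build-subpats-then-scan two-phase version (same O(n), simpler).


-- ===== PORT A =====
-- Transliteration of A: first fold builds subpats + (start_idx, longest); second fold
-- over enumerate picks the selection index; final subpats[longest] is always in range
-- (the index is only ever set to an enumerate index), so .getD (0,0) is never reached.
def find_longest_sub_pattern_idx (readings : List Int) : Int × Int :=
  let fin := readings.foldl
    (fun (st : Int × Int × List (Int × Int)) row =>
      if (PySem.List.pyGet? readings st.1).getD 0 = row then
        (st.1, st.2.1 + 1, st.2.2)
      else
        (st.2.1, st.2.1 + 1, st.2.2 ++ [(st.1, st.2.1)]))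
    (0, 0, [])
  let subpats := fin.2.2 ++ [(fin.1, fin.2.1)]
  let sel := (PySem.List.enumerate subpats).foldl
    (fun (st : Int × Int) p =>
      if p.2.2 - p.2.1 > st.1 then (p.2.2 - p.2.1, p.1) else st)
    (1, 0)
  (PySem.List.pyGet? subpats sel.2).getD (0, 0)

-- ===== PORT B =====
-- Transliteration of B: one pass tracking (best, best_len, run_start), closing the final run.
def find_longest_sub_pattern_idx_alt (readings : List Int) : Int × Int :=
  let n : Int := readings.length
  let st := (PySem.List.pyRange 1 n 1).foldl
    (fun (st : (Int × Int) × Int × Int) i =>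
      if (PySem.List.pyGet? readings i).getD 0 ≠ (PySem.List.pyGet? readings st.2.2).getD 0 then
        if i - st.2.2 > st.2.1 then ((st.2.2, i), i - st.2.2, i)
        else (st.1, st.2.1, i)
      else st)
    ((0, 0), 0, 0)
  if n - st.2.2 > st.2.1 then (st.2.2, n) else st.1

-- ===== PRECONDITION & SPEC =====
def Spec_find_longest_sub_pattern_idx (readings : List Int) (out : Int × Int) : Prop := out = find_longest_sub_pattern_idx_alt readings
instance (readings : List Int) (out : Int × Int) : Decidable (Spec_find_longest_sub_pattern_idx readings out) := by unfold Spec_find_longest_sub_pattern_idx; infer_instance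

-- ===== CLAIM (what is proved, stated in full; the proofs are below) =====
def Claim_equal_find_longest_sub_pattern_idx : Prop := ∀ (readings : List Int), Dom_find_longest_sub_pattern_idx readings → Spec_find_longest_sub_pattern_idx readings (find_longest_sub_pattern_idx readings)

-- ===== LEMMAS AND PROOFS =====

-- Named copies of the four loop bodies (definitionally equal to the ports' lambdas).
def stepA (readings : List Int) (st : Int × Int × List (Int × Int)) (row : Int) :
    Int × Int × List (Int × Int) :=
  if (PySem.List.pyGet? readings st.1).getD 0 = row then (st.1, st.2.1 + 1, st.2.2)
  else (st.2.1, st.2.1 + 1, st.2.2 ++ [(st.1, st.2.1)])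

def stepB (readings : List Int) (st : (Int × Int) × Int × Int) (i : Int) :
    (Int × Int) × Int × Int :=
  if (PySem.List.pyGet? readings i).getD 0 ≠ (PySem.List.pyGet? readings st.2.2).getD 0 then
    if i - st.2.2 > st.2.1 then ((st.2.2, i), i - st.2.2, i) else (st.1, st.2.1, i)
  else st

def pick (st : (Int × Int) × Int) (p : Int × Int) : (Int × Int) × Int :=
  if p.2 - p.1 > st.2 then (p, p.2 - p.1) else st

def step2 (st : Int × Int) (p : Int × (Int × Int)) : Int × Int :=
  if p.2.2 - p.2.1 > st.1 then (p.2.2 - p.2.1, p.1) else st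

-- A-state / B-state after processing the first k elements.
def AS (readings : List Int) (k : Nat) : Int × Int × List (Int × Int) :=
  (readings.take k).foldl (stepA readings) (0, 0, [])

def BS (readings : List Int) (k : Nat) : (Int × Int) × Int × Int :=
  (PySem.List.pyRange 1 (k : Int) 1).foldl (stepB readings) ((0, 0), 0, 0)

lemma portA_eq (readings : List Int) :
    find_longest_sub_pattern_idx readings =
      (PySem.List.pyGet?
        ((AS readings readings.length).2.2 ++
          [((AS readings readings.length).1, (AS readings readings.length).2.1)])
        ((PySem.List.enumerate
            ((AS readings readings.length).2.2 ++
              [((AS readings readings.length).1, (AS readings readings.length).2.1)])).foldl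
          step2 (1, 0)).2).getD (0, 0) := by
  unfold AS
  rw [List.take_length]
  rfl

lemma portB_eq (readings : List Int) :
    find_longest_sub_pattern_idx_alt readings =
      (if (readings.length : Int) - (BS readings readings.length).2.2 >
          (BS readings readings.length).2.1
        then ((BS readings readings.length).2.2, (readings.length : Int))
        else (BS readings readings.length).1) := by
  rfl

-- The selection scan: A's index-tracking fold agrees with the pair-tracking pick fold.
lemma sel_fold (F : List (Int × Int)) (l : List (Int × (Int × Int)))
    (ll j bl : Int) (b : Int × Int)
    (hll : ll = bl) (hj : PySem.List.pyGet? F j = some b)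
    (hmem : ∀ p ∈ l, PySem.List.pyGet? F p.1 = some p.2) :
    (PySem.List.pyGet? F (l.foldl step2 (ll, j)).2).getD (0, 0) =
      ((l.map (·.2)).foldl pick (b, bl)).1 := by
  induction l generalizing ll j b bl with
  | nil => simp [hj]
  | cons p t ih =>
    have hp := hmem p (List.mem_cons_self ..)
    have hmem' : ∀ q ∈ t, PySem.List.pyGet? F q.1 = some q.2 :=
      fun q hq => hmem q (List.mem_cons_of_mem _ hq)
    by_cases hc : p.2.2 - p.2.1 > bl
    · simp only [List.foldl_cons, List.map_cons, step2, pick, hll, if_pos hc]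
      exact ih (p.2.2 - p.2.1) p.1 (p.2.2 - p.2.1) p.2 rfl hp hmem'
    · simp only [List.foldl_cons, List.map_cons, step2, pick, hll, if_neg hc]
      exact ih bl j bl b rfl hj hmem'

-- Top-level selection: on a nonempty list whose head run has length ≥ 1,
-- A's two-phase selection equals the first-maximal pick fold.
lemma sel_top (q : Int × Int) (qs : List (Int × Int)) (hq : 1 ≤ q.2 - q.1) :
    (PySem.List.pyGet? (q :: qs)
        ((PySem.List.enumerate (q :: qs)).foldl step2 (1, 0)).2).getD (0, 0) =
      ((q :: qs).foldl pick ((0, 0), 0)).1 := by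
  have hmem : ∀ p ∈ PySem.List.enumerate qs 1,
      PySem.List.pyGet? (q :: qs) p.1 = some p.2 := by
    intro p hp
    rcases (PySem.List.mem_enumerate_iff qs 1 p).1 hp with ⟨k, hk, rfl⟩
    have h1 : (1 : Int) + k = (k : Int) + 1 := by ring
    rw [h1, PySem.List.pyGet?_cons_succ, PySem.List.pyGet?_natCast]
    simp [hk]
  have hq0 : PySem.List.pyGet? (q :: qs) 0 = some q := PySem.List.pyGet?_zero_cons ..
  have hmap : (PySem.List.enumerate qs 1).map (·.2) = qs := PySem.List.map_snd_enumerate ..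
  rw [PySem.List.enumerate_cons]
  by_cases hc : q.2 - q.1 > 1
  · simp only [List.foldl_cons, step2, pick, if_pos hc, if_pos (by omega : q.2 - q.1 > 0)]
    have := sel_fold (q :: qs) (PySem.List.enumerate qs 1) (q.2 - q.1) 0 (q.2 - q.1) q rfl hq0 hmem
    rw [hmap] at this
    exact this
  · have h1 : q.2 - q.1 = 1 := by omega
    simp only [List.foldl_cons, step2, pick, if_neg hc, if_pos (by omega : q.2 - q.1 > 0)]
    have := sel_fold (q :: qs) (PySem.List.enumerate qs 1) 1 0 (q.2 - q.1) q (by omega) hq0 hmem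
    rw [hmap] at this
    exact this

-- The simulation invariant between the two first-phase loops.
lemma inv (readings : List Int) (k : Nat) (hk1 : 1 ≤ k) (hkn : k ≤ readings.length) :
    (AS readings k).2.1 = (k : Int) ∧
    (AS readings k).1 = (BS readings k).2.2 ∧
    0 ≤ (AS readings k).1 ∧ (AS readings k).1 < (k : Int) ∧
    ((BS readings k).1, (BS readings k).2.1) =
      ((AS readings k).2.2.foldl pick ((0, 0), 0)) ∧
    ((AS readings k).2.2 = [] ∨
      ∃ p ps, (AS readings k).2.2 = p :: ps ∧ 1 ≤ p.2 - p.1) := by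
  induction k with
  | zero => omega
  | succ k ih =>
    rcases Nat.lt_or_ge k 1 with hk0 | hk0
    · -- k = 0 : base case, k+1 = 1
      have hk : k = 0 := by omega
      subst hk
      have hlen : 0 < readings.length := hkn
      have htake : readings.take 1 = [readings[0]] := by
        cases readings with
        | nil => simp at hlen
        | cons x xs => simp
      have hget : PySem.List.pyGet? readings ((0:Int)) = some readings[0] := by
        rw [show ((0:Int)) = ((0:Nat):Int) by simp, PySem.List.pyGet?_natCast]
        simp [hlen]
      constructor
      · simp [AS, htake, stepA, hget]
      constructor
      · simp [AS, BS, htake, stepA, hget, PySem.List.pyRange_one_eq_nil]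
      refine ⟨?_, ?_, ?_, ?_⟩
      · simp [AS, htake, stepA, hget]
      · simp [AS, htake, stepA, hget]
      · simp [AS, BS, htake, stepA, hget, PySem.List.pyRange_one_eq_nil]
      · left; simp [AS, htake, stepA, hget]
    · have ih := ih hk0 (by omega)
      obtain ⟨hlng, hrs, hs0, hsk, hbest, hhead⟩ := ih
      have hklen : k < readings.length := by omega
      -- unfold one step of each loop
      have htake : readings.take (k+1) = readings.take k ++ [readings[k]] :=
        List.take_succ_eq_append_getElem hklen
      have hAstep : AS readings (k+1) = stepA readings (AS readings k) readings[k] := by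
        rw [AS, htake, List.foldl_append]; rfl
      have hrange : PySem.List.pyRange 1 ((k+1 : Nat) : Int) 1 =
          PySem.List.pyRange 1 (k : Int) 1 ++ [(k : Int)] := by
        have : ((k+1 : Nat) : Int) = (k : Int) + 1 := by push_cast; ring
        rw [this, PySem.List.pyRange_one_succ_right (by omega)]
      have hBstep : BS readings (k+1) = stepB readings (BS readings k) (k : Int) := by
        rw [BS, hrange, List.foldl_append]; rfl
      have hgetk : PySem.List.pyGet? readings ((k : Nat) : Int) = some readings[k] := by
        rw [PySem.List.pyGet?_natCast]; simp [hklen]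
      by_cases hc : (PySem.List.pyGet? readings (AS readings k).1).getD 0 = readings[k]
      · -- run continues: A takes the if-branch, B's condition is false
        have hBc : ¬ ((PySem.List.pyGet? readings ((k:Nat):Int)).getD 0 ≠
            (PySem.List.pyGet? readings (BS readings k).2.2).getD 0) := by
          rw [hgetk, ← hrs]; simp [hc]
        rw [hAstep, hBstep, stepA, stepB, if_pos hc, if_neg hBc]
        refine ⟨by push_cast; omega, hrs, hs0, by push_cast; omega, hbest, hhead⟩
      · -- run ends: A appends, B closes the run
        have hBc : ((PySem.List.pyGet? readings ((k:Nat):Int)).getD 0 ≠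
            (PySem.List.pyGet? readings (BS readings k).2.2).getD 0) := by
          rw [hgetk, ← hrs]; simpa using fun h => hc h.symm
        rw [hAstep, hBstep, stepA, stepB, if_neg hc, if_pos hBc]
        have hpick : ((AS readings k).2.2 ++ [((AS readings k).1, (AS readings k).2.1)]).foldl
            pick ((0,0),0) =
            pick ((BS readings k).1, (BS readings k).2.1)
              ((AS readings k).1, (AS readings k).2.1) := by
          rw [List.foldl_append, ← hbest]; rfl
        by_cases hc2 : (k : Int) - (BS readings k).2.2 > (BS readings k).2.1
        · rw [if_pos hc2]
          refine ⟨by push_cast; omega, by simp [hlng], by rw [hlng]; omega,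
            by rw [hlng]; push_cast; omega, ?_, ?_⟩
          · rw [hpick, pick, hlng, hrs, if_pos hc2]
          · rcases hhead with h | ⟨p, ps, hps, hp⟩
            · right
              refine ⟨((AS readings k).1, (AS readings k).2.1), [], by simp [h], ?_⟩
              rw [hlng]; omega
            · right
              exact ⟨p, ps ++ [((AS readings k).1, (AS readings k).2.1)], by simp [hps], hp⟩
        · rw [if_neg hc2]
          refine ⟨by push_cast; omega, by simp [hlng], by rw [hlng]; omega,
            by rw [hlng]; push_cast; omega, ?_, ?_⟩
          · rw [hpick, pick, hlng, hrs, if_neg hc2]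
          · rcases hhead with h | ⟨p, ps, hps, hp⟩
            · right
              refine ⟨((AS readings k).1, (AS readings k).2.1), [], by simp [h], ?_⟩
              rw [hlng]; omega
            · right
              exact ⟨p, ps ++ [((AS readings k).1, (AS readings k).2.1)], by simp [hps], hp⟩

-- ===== VERDICT (by name: the statement is the Claim_ definition above) =====
theorem find_longest_sub_pattern_idx_spec : Claim_equal_find_longest_sub_pattern_idx := by
  intro readings _
  unfold Spec_find_longest_sub_pattern_idx
  cases hre : readings with
  | nil => rfl
  | cons x xs =>
    subst hre
    set n := (x :: xs).length with hn
    have hn1 : 1 ≤ n := by simp [hn]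
    obtain ⟨hlng, hrs, hs0, hsk, hbest, hhead⟩ := inv (x :: xs) n hn1 le_rfl
    rw [portA_eq, portB_eq]
    -- final runs list F = sp ++ [(s, n)]
    set a := AS (x :: xs) n
    set bs := BS (x :: xs) n
    have hBres : (if (n : Int) - bs.2.2 > bs.2.1 then (bs.2.2, (n : Int)) else bs.1) =
        ((a.2.2 ++ [(a.1, a.2.1)]).foldl pick ((0,0),0)).1 := by
      rw [List.foldl_append, ← hbest, hlng, hrs]
      by_cases h : (n : Int) - bs.2.2 > bs.2.1
      · rw [if_pos h]; simp only [List.foldl_cons, List.foldl_nil, pick, if_pos h]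
      · rw [if_neg h]; simp only [List.foldl_cons, List.foldl_nil, pick, if_neg h]
    rw [hBres]
    rcases hhead with h | ⟨p, ps, hps, hp⟩
    · rw [h]
      exact sel_top (a.1, a.2.1) [] (by simp [hlng]; omega)
    · rw [hps]
      exact sel_top p (ps ++ [(a.1, a.2.1)]) hp
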